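-- pv_equiv track=rewrite | github.com/UChiSeclab/wedge | code-contest-exp/scripts/cgig/cgig_utils.py | get_best_input_pair_by_freq
-- ===== SOURCE A (Python) =====
-- from typing import List, Tuple, Dict, Literal
--
-- def get_best_input_pair_by_freq(solution_input_pairs: Dict[str, List[Tuple[str, str]]]) -> Tuple[Tuple[str, str], List[str]]:
--     # rank the input pairs by the frequency in the solution_input_pairs
--     if len(solution_input_pairs) == 0:
--         return None, []
--
--     input_pair_freq = {}
--     for solution_id in solution_input_pairs:
--         for slow_input_id, fast_input_id in solution_input_pairs[solution_id]:
--             input_pair_freq[(slow_input_id, fast_input_id)] = input_pair_freq.get((slow_input_id, fast_input_id), []) + [solution_id]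
--
--     best_input_pair = max(input_pair_freq, key=lambda x: len(input_pair_freq[x]))
--
--     return best_input_pair, input_pair_freq[best_input_pair] # not sorted
-- ===== SOURCE B (Python) =====
-- def get_best_input_pair_by_freq(solution_input_pairs):
--     # Count each pair's frequency (ints, not lists), pick the first pair with the
--     # maximal count by an explicit running-max scan, then recompute its solution-id
--     # list in a second pass over the input. No per-pair id lists are ever stored.
--     if len(solution_input_pairs) == 0:
--         return None, []
--
--     counts = {}
--     for solution_id in solution_input_pairs:
--         for pair in solution_input_pairs[solution_id]:
--             counts[pair] = counts.get(pair, 0) + 1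
--
--     best_pair = None
--     best_count = -1
--     for pair, count in counts.items():
--         if count > best_count:
--             best_pair, best_count = pair, count
--
--     solution_ids = []
--     for solution_id in solution_input_pairs:
--         for pair in solution_input_pairs[solution_id]:
--             if pair == best_pair:
--                 solution_ids.append(solution_id)
--
--     return best_pair, solution_ids
-- ===== Notes on version B (the rewrite author's own statement) =====
-- stated objective: alternative
-- what changed: B never builds A's inverted index of per-pair solution-id lists (A rebuilds a list with get()+concatenation on every record): it counts pair frequencies with an int counter dict, selects the first maximal pair by an explicit running-max scan instead of max(keys, key=...), and recomputes only the winner's solution-id list in a second pass over the input.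
import Mathlib
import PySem

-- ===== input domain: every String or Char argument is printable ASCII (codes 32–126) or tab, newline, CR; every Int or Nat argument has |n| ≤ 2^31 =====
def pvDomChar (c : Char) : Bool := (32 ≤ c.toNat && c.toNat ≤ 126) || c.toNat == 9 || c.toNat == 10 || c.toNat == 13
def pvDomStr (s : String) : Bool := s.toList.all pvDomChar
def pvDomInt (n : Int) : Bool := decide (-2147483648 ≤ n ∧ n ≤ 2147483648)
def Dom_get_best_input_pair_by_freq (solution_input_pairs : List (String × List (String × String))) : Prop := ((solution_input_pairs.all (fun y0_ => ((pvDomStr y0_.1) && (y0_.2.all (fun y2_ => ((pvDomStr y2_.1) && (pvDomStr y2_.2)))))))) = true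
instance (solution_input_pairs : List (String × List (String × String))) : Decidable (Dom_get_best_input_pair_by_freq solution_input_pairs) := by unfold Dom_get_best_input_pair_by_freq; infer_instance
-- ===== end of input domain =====

-- B replaces A's inverted index of solution-id lists by an int counter plus an explicit
-- running-max scan and a second pass recomputing only the winning pair's id list (no per-pair
-- list concatenation); proved to return A's exact value wherever A returns (A raises ValueError
-- on a nonempty dict whose pair lists are all empty; Pre_ excludes exactly those inputs).


-- ===== PORT A =====
def get_best_input_pair_by_freq (solution_input_pairs : List (String × List (String × String))) : (Option (String × String)) × List String :=
  if solution_input_pairs.length = 0 then (none, [])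
  else
    let input_pair_freq : PySem.Dict (String × String) (List String) :=
      solution_input_pairs.foldl
        (fun d p => p.2.foldl (fun d pr => d.insert pr (d.getD pr [] ++ [p.1])) d)
        PySem.Dict.empty
    -- max(input_pair_freq, key=lambda x: len(input_pair_freq[x])): first key of maximal length
    match PySem.List.max? input_pair_freq.keys (fun k => ((input_pair_freq.getD k []).length : Int)) with
    | some best => (some best, input_pair_freq.getD best [])
    | none => (none, [])   -- Python raises ValueError here (nonempty input, all lists empty); excluded by Pre_

-- ===== PORT B =====
def get_best_input_pair_by_freq_alt (solution_input_pairs : List (String × List (String × String))) : (Option (String × String)) × List String :=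
  if solution_input_pairs.length = 0 then (none, [])
  else
    let counts : PySem.Dict (String × String) Int :=
      solution_input_pairs.foldl
        (fun d p => p.2.foldl (fun d pr => d.insert pr (d.getD pr 0 + 1)) d)
        PySem.Dict.empty
    -- running-max scan over counts.items, strict '>' keeps the first maximal pair
    let best :=
      counts.items.foldl
        (fun (acc : Option (String × String) × Int) kv =>
          if kv.2 > acc.2 then (some kv.1, kv.2) else acc)
        (none, -1)
    -- second pass: collect the ids whose pair list contains the best pair
    let ids :=
      solution_input_pairs.foldl
        (fun acc p => p.2.foldl (fun acc pr => if some pr = best.1 then acc ++ [p.1] else acc) acc)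
        ([] : List String)
    (best.1, ids)

-- ===== PRECONDITION & SPEC =====
-- Pre_ excludes exactly the inputs where the Python A raises (ValueError from max on an empty
-- sequence): a nonempty dict all of whose value lists are empty (B returns (None, []) there).
def Pre_get_best_input_pair_by_freq (solution_input_pairs : List (String × List (String × String))) : Prop :=
  solution_input_pairs = [] ∨ ∃ p ∈ solution_input_pairs, p.2 ≠ []
instance (solution_input_pairs : List (String × List (String × String))) : Decidable (Pre_get_best_input_pair_by_freq solution_input_pairs) := by unfold Pre_get_best_input_pair_by_freq; infer_instance

def pvWitness_get_best_input_pair_by_freq : (List (String × List (String × String))) :=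
  [("s1", [("a", "b")]), ("s2", [("a", "b"), ("c", "d")])]

def Spec_get_best_input_pair_by_freq (solution_input_pairs : List (String × List (String × String))) (out : (Option (String × String)) × List String) : Prop := out = get_best_input_pair_by_freq_alt solution_input_pairs
instance (solution_input_pairs : List (String × List (String × String))) (out : (Option (String × String)) × List String) : Decidable (Spec_get_best_input_pair_by_freq solution_input_pairs out) := by unfold Spec_get_best_input_pair_by_freq; infer_instance

-- ===== CLAIM (what is proved, stated in full; the proofs are below) =====
def Claim_equal_get_best_input_pair_by_freq : Prop := ∀ (solution_input_pairs : List (String × List (String × String))), Dom_get_best_input_pair_by_freq solution_input_pairs → Pre_get_best_input_pair_by_freq solution_input_pairs → Spec_get_best_input_pair_by_freq solution_input_pairs (get_best_input_pair_by_freq solution_input_pairs)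

-- ===== LEMMAS AND PROOFS =====

-- the running-max scan from (some m, f m) tracks max?'s fold from (some m)
lemma scan_fst_aux {α : Type} (f : α → Int) (t : List α) (m : α) :
    (t.foldl (fun acc x => if f x > acc.2 then (some x, f x) else acc) (some m, f m)).1
      = t.foldl (fun acc x => match acc with
            | none => some x
            | some m => if f m < f x then some x else some m) (some m) := by
  induction t generalizing m with
  | nil => rfl
  | cons x t ih =>
    simp only [List.foldl_cons, gt_iff_lt]
    by_cases h : f m < f x <;> simp [h, ih]

-- the running-max scan from (none, -1) computes Python's max (first maximal element)
lemma scan_fst_eq_max? {α : Type} (l : List α) (f : α → Int) (h : ∀ x ∈ l, 0 ≤ f x) :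
    (l.foldl (fun acc x => if f x > acc.2 then (some x, f x) else acc)
        ((none : Option α), (-1 : Int))).1 = PySem.List.max? l f := by
  cases l with
  | nil => rfl
  | cons x t =>
    have hx : (-1 : Int) < f x := by have := h x (List.mem_cons_self ..); omega
    simp only [PySem.List.max?, List.foldl_cons, gt_iff_lt, hx, if_pos]
    exact scan_fst_aux f t x

-- ===== VERDICT (by name: the statement is the Claim_ definition above) =====
theorem get_best_input_pair_by_freq_spec : Claim_equal_get_best_input_pair_by_freq := by
  unfold Claim_equal_get_best_input_pair_by_freq
  intro xs _hdom _hpre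
  unfold Spec_get_best_input_pair_by_freq
  unfold get_best_input_pair_by_freq get_best_input_pair_by_freq_alt
  by_cases h0 : xs.length = 0
  · simp [h0]
  · simp only [h0, if_false]
    -- flatten both nested build loops over the same flat list of (pair, id) records
    have hflat1 : xs.foldl
        (fun d p => p.2.foldl (fun d pr => d.insert pr (d.getD pr [] ++ [p.1])) d)
        (PySem.Dict.empty : PySem.Dict (String × String) (List String))
        = (xs.flatMap (fun p => p.2.map (fun pr => (pr, p.1)))).foldl
            (fun d q => d.modify q.1 [] (· ++ [q.2])) PySem.Dict.empty := by
      rw [List.foldl_flatMap]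
      apply PySem.List.foldl_congr_mem
      intro d p _
      rw [List.foldl_map]
      rfl
    have hflat2 : xs.foldl
        (fun d p => p.2.foldl (fun d pr => d.insert pr (d.getD pr 0 + 1)) d)
        (PySem.Dict.empty : PySem.Dict (String × String) Int)
        = PySem.Dict.counter (xs.flatMap (fun p => p.2)) := by
      rw [← PySem.Dict.foldl_insert_getD_add_one_eq_counter, List.foldl_flatMap]
    set flat := xs.flatMap (fun p => p.2.map (fun pr => (pr, p.1))) with hflatdef
    have hfst : flat.map (·.1) = xs.flatMap (fun p => p.2) := by
      simp [hflatdef, List.map_flatMap, Function.comp_def]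
    set flat2 := xs.flatMap (fun p => p.2) with hflat2def
    -- A's dict: lookup is filter-then-project over flat; keys are the distinct pairs
    have hget : ∀ q, (xs.foldl
        (fun d p => p.2.foldl (fun d pr => d.insert pr (d.getD pr [] ++ [p.1])) d)
        PySem.Dict.empty).getD q []
        = (flat.filter (fun r => r.1 == q)).map (·.2) := by
      intro q
      rw [hflat1, PySem.Dict.getD_foldl_modify_append, PySem.Dict.getD_empty]
      simp
    have hkeys : (xs.foldl
        (fun d p => p.2.foldl (fun d pr => d.insert pr (d.getD pr [] ++ [p.1])) d)
        (PySem.Dict.empty : PySem.Dict (String × String) (List String))).keys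
        = PySem.Set.ofList flat2 := by
      rw [hflat1]
      have := PySem.Dict.keys_foldl_modify_key (l := flat) (key := (·.1))
        (d0 := ([] : List String)) (f := fun d q => (· ++ [q.2]))
        (d := (PySem.Dict.empty : PySem.Dict (String × String) (List String)))
      simpa [PySem.Dict.keys_empty, PySem.Set.update, PySem.Set.ofList, hfst] using this
    -- the frequency of a pair = its count in flat2
    have hcnt : ∀ q, ((xs.foldl
        (fun d p => p.2.foldl (fun d pr => d.insert pr (d.getD pr [] ++ [p.1])) d)
        PySem.Dict.empty).getD q [] |>.length : Int) = (flat2.count q : Int) := by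
      intro q
      rw [hget q]
      simp [List.countP_eq_length_filter, ← hfst, List.count_eq_countP,
        List.filter_map, List.length_map, Function.comp_def]
    -- B's scan computes the same first-maximal pair as A's max
    have hbest : ((PySem.Dict.counter flat2).items.foldl
        (fun (acc : Option (String × String) × Int) kv =>
          if kv.2 > acc.2 then (some kv.1, kv.2) else acc) (none, -1)).1
        = PySem.List.max? (PySem.Set.ofList flat2) (fun q => (flat2.count q : Int)) := by
      rw [PySem.Dict.items_counter, List.foldl_map]
      exact scan_fst_eq_max? _ _ (by intro x _; positivity)
    rw [hflat2, hbest, hkeys]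
    have hmaxeq : PySem.List.max? (PySem.Set.ofList flat2)
        (fun k => (((xs.foldl
          (fun d p => p.2.foldl (fun d pr => d.insert pr (d.getD pr [] ++ [p.1])) d)
          PySem.Dict.empty).getD k []).length : Int))
        = PySem.List.max? (PySem.Set.ofList flat2) (fun q => (flat2.count q : Int)) := by
      congr 1; funext q; exact hcnt q
    rw [hmaxeq]
    cases hm : PySem.List.max? (PySem.Set.ofList flat2) (fun q => (flat2.count q : Int)) with
    | none =>
      simp only []
      simp
    | some bp =>
      simp only [Prod.mk.injEq, true_and]
      -- the gathered id list equals A's stored list for bp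
      have hids : xs.foldl
          (fun acc p => p.2.foldl (fun acc pr => if some pr = some bp then acc ++ [p.1] else acc) acc)
          ([] : List String)
          = (flat.filter (fun r => r.1 == bp)).map (·.2) := by
        have h1 : xs.foldl
            (fun acc p => p.2.foldl (fun acc pr => if some pr = some bp then acc ++ [p.1] else acc) acc)
            ([] : List String)
            = xs.foldl (fun acc p => (p.2.map (fun pr => (pr, p.1))).foldl
                (fun acc q => if some q.1 = some bp then acc ++ [q.2] else acc) acc) [] := by
          apply PySem.List.foldl_congr_mem
          intro acc p _
          rw [List.foldl_map]
        rw [h1, ← List.foldl_flatMap, ← hflatdef]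
        rw [PySem.List.foldl_append_ite
              (p := fun q : (String × String) × String => some q.1 = some bp) (f := (·.2))]
        simp only [Option.some.injEq, List.nil_append]
        congr 1
        apply List.filter_congr
        intro x _
        exact Eq.symm (Bool.beq_eq_decide_eq x.1 bp)
      rw [hget bp, hids]
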